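-- pv_equiv track=rewrite | github.com/Phystam/navia | jma_parsers/jma_base_parser.py | get_warning_level
-- ===== SOURCE A (Python) =====
-- def get_warning_level(codeelement):
--
--     caution_code=["10","12","13","14","15","16","17","18","19",
--                   "20","21,","22","23","24","25","26","27"]
--     warning_code=["02","03","04","05","06","07"]
--     special_code=["32","35","36","37","38","08"]
--     emergency_code=["33"]
--     if "00" in codeelement:
--         return 0
--
--     for item in emergency_code:
--         if item in codeelement:
--             return 5
--     for item in special_code:
--         if item in codeelement:
--             return 4
--     for item in warning_code:
--         if item in codeelement:
--             return 3
--     for item in caution_code: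
--         if item in codeelement:
--             return 2
-- ===== SOURCE B (Python) =====
-- def get_warning_level(codeelement):
--     if "00" in codeelement:
--         return 0
--     groups = [(5, ["33"]),
--               (4, ["32", "35", "36", "37", "38", "08"]),
--               (3, ["02", "03", "04", "05", "06", "07"]),
--               (2, ["10", "12", "13", "14", "15", "16", "17", "18", "19",
--                    "20", "21,", "22", "23", "24", "25", "26", "27"])]
--     table = {code: lvl for lvl, codes in groups for code in codes}
--     best = None
--     for code, lvl in table.items():
--         if code in codeelement:
--             if best is None or lvl > best:
--                 best = lvl
--     return best
-- ===== Notes on version B (the rewrite author's own statement) =====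
-- stated objective: idiomatic
-- what changed: Replaces the four sequential early-return scans over per-level code lists by one flat code-to-level table traversed in a single max-tracking pass.
import Mathlib
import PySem

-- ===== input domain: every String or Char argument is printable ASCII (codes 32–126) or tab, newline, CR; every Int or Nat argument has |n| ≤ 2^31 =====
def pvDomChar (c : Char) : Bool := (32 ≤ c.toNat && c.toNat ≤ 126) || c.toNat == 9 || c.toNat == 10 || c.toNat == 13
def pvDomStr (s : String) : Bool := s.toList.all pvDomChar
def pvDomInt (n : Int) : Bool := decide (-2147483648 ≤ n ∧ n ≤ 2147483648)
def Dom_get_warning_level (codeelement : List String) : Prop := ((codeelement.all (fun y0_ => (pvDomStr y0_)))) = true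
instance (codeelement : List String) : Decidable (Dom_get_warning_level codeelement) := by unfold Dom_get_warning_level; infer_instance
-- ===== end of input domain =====

-- B replaces A's four sequential early-return scans by one flat code→level table
-- traversed in a single max-tracking pass (idiomatic decomposition, same cost).


-- ===== PORT A =====
-- one 'for item in codes: if item in codeelement: return lvl' loop of A
def pvLoopRet (codes : List String) (ce : List String) (lvl : Int) : Option Int :=
  match codes with
  | [] => none
  | c :: rest => if ce.contains c then some lvl else pvLoopRet rest ce lvl

def get_warning_level (codeelement : List String) : Option Int :=
  let caution_code := ["10","12","13","14","15","16","17","18","19","20","21,","22","23","24","25","26","27"]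
  let warning_code := ["02","03","04","05","06","07"]
  let special_code := ["32","35","36","37","38","08"]
  let emergency_code := ["33"]
  if codeelement.contains "00" then some 0
  else
    match pvLoopRet emergency_code codeelement 5 with
    | some v => some v
    | none =>
      match pvLoopRet special_code codeelement 4 with
      | some v => some v
      | none =>
        match pvLoopRet warning_code codeelement 3 with
        | some v => some v
        | none => pvLoopRet caution_code codeelement 2

-- ===== PORT B =====
def pvGroups : List (Int × List String) :=
  [(5, ["33"]),
   (4, ["32","35","36","37","38","08"]),
   (3, ["02","03","04","05","06","07"]),
   (2, ["10","12","13","14","15","16","17","18","19","20","21,","22","23","24","25","26","27"])]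

-- one step of B's max-tracking loop over the table's items
def pvStep (ce : List String) (best : Option Int) (item : String × Int) : Option Int :=
  if ce.contains item.1 then
    match best with
    | none => some item.2
    | some b => if item.2 > b then some item.2 else best
  else best

def get_warning_level_alt (codeelement : List String) : Option Int :=
  if codeelement.contains "00" then some 0
  else
    -- all keys are distinct, so the dict comprehension's items are exactly this list
    let table := pvGroups.flatMap (fun g => g.2.map (fun c => (c, g.1)))
    table.foldl (pvStep codeelement) none

-- ===== PRECONDITION & SPEC =====
def Spec_get_warning_level (codeelement : List String) (out : Option Int) : Prop := out = get_warning_level_alt codeelement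
instance (codeelement : List String) (out : Option Int) : Decidable (Spec_get_warning_level codeelement out) := by unfold Spec_get_warning_level; infer_instance

-- ===== CLAIM (what is proved, stated in full; the proofs are below) =====
def Claim_equal_get_warning_level : Prop := ∀ (codeelement : List String), Dom_get_warning_level codeelement → Spec_get_warning_level codeelement (get_warning_level codeelement)

-- ===== LEMMAS AND PROOFS =====

def pvOmax (acc : Option Int) (lvl : Int) : Option Int :=
  match acc with
  | none => some lvl
  | some b => if lvl > b then some lvl else some b

lemma pvLoopRet_eq (codes ce : List String) (lvl : Int) :
    pvLoopRet codes ce lvl = if ∃ x ∈ codes, x ∈ ce then some lvl else none := by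
  induction codes with
  | nil => simp [pvLoopRet]
  | cons c rest ih =>
    simp only [pvLoopRet, ih]
    by_cases h : c ∈ ce <;> by_cases h2 : (∃ x ∈ rest, x ∈ ce) <;> simp [h, h2]

lemma pvOmax_idem (acc : Option Int) (lvl : Int) : pvOmax (pvOmax acc lvl) lvl = pvOmax acc lvl := by
  cases acc with
  | none => simp [pvOmax]
  | some b => by_cases hb : lvl > b <;> simp [pvOmax, hb]

lemma pvGroup_fold (ce : List String) (lvl : Int) (codes : List String) (acc : Option Int) :
    (codes.map (fun c => (c, lvl))).foldl (pvStep ce) acc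
      = if ∃ x ∈ codes, x ∈ ce then pvOmax acc lvl else acc := by
  induction codes generalizing acc with
  | nil => simp
  | cons c rest ih =>
    simp only [List.map_cons, List.foldl_cons]
    by_cases h : c ∈ ce
    · have hstep : pvStep ce acc (c, lvl) = pvOmax acc lvl := by
        cases acc <;> simp [pvStep, pvOmax, h]
      rw [hstep, ih]
      by_cases h2 : (∃ x ∈ rest, x ∈ ce) <;> simp [h, h2, pvOmax_idem]
    · have hstep : pvStep ce acc (c, lvl) = acc := by
        simp [pvStep, h]
      rw [hstep, ih]
      by_cases h2 : (∃ x ∈ rest, x ∈ ce) <;> simp [h, h2]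

-- ===== VERDICT (by name: the statement is the Claim_ definition above) =====
theorem get_warning_level_spec : Claim_equal_get_warning_level := by
  intro ce _
  unfold Spec_get_warning_level get_warning_level get_warning_level_alt
  by_cases hz : ("00" : String) ∈ ce
  · simp [hz]
  · simp only [List.contains_eq_mem, hz, decide_false, Bool.false_eq_true, if_false,
      pvGroups, List.flatMap_cons, List.flatMap_nil, List.append_nil,
      List.foldl_append, pvGroup_fold, pvLoopRet_eq]
    by_cases h5 : (∃ x ∈ (["33"] : List String), x ∈ ce) <;>
    by_cases h4 : (∃ x ∈ (["32","35","36","37","38","08"] : List String), x ∈ ce) <;>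
    by_cases h3 : (∃ x ∈ (["02","03","04","05","06","07"] : List String), x ∈ ce) <;>
    by_cases h2 : (∃ x ∈ (["10","12","13","14","15","16","17","18","19","20","21,","22","23","24","25","26","27"] : List String), x ∈ ce) <;>
      simp only [h5, h4, h3, h2, if_true, if_false, pvOmax] <;> norm_num
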